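-- pv_equiv track=rewrite | github.com/Flame4Game/VLR-momentum-finder | main.py | split_into_maps
-- ===== SOURCE A (Python) =====
-- def split_into_maps(rounds):
--     """
--     Splits round data into separate maps.
--
--     Args:
--         rounds: List of (round_num, winner) tuples
--
--     Returns:
--         List of maps, where each map contains its round data
--     """
--     maps = []
--     current_map = []
--     for round_num, winner in rounds:
--         if round_num == 1 and current_map:
--             maps.append(current_map)
--             current_map = []
--         current_map.append((round_num, winner))
--     if current_map:
--         maps.append(current_map)
--     return maps
-- ===== SOURCE B (Python) =====
-- def split_into_maps(rounds):
--     """Two-pointer re-implementation: scan for the next round_num==1 boundary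
--     and emit the slice between consecutive boundaries; no accumulator/flush."""
--     maps = []
--     n = len(rounds)
--     i = 0
--     while i < n:
--         j = i + 1
--         while j < n and rounds[j][0] != 1:
--             j += 1
--         maps.append(rounds[i:j])
--         i = j
--     return maps
-- ===== Notes on version B (the rewrite author's own statement) =====
-- stated objective: alternative
-- what changed: Replaced A's accumulate-and-flush fold (current_map rebuilt and appended on each boundary) by a two-pointer index scan that finds the next round_num==1 boundary and emits the slice rounds[i:j] directly.
import Mathlib
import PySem

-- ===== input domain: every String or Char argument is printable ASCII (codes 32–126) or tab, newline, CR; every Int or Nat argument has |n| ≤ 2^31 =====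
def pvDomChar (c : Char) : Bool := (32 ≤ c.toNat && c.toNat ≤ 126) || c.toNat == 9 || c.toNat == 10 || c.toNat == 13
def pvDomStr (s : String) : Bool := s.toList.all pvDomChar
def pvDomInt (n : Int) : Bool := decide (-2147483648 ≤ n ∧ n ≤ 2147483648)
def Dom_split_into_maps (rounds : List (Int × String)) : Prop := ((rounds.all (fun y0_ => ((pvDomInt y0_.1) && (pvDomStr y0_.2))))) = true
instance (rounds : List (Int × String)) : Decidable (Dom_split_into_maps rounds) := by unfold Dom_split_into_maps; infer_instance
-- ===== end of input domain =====

-- B replaces A's accumulate-and-flush loop by a two-pointer boundary scan emitting slices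
-- (objective: alternative; same O(n) cost, return values proved identical on all inputs).

-- ===== PORT A =====
-- one step of A's for-loop: flush current_map on a round_num==1 boundary, then append
def pvStep (st : List (List (Int × String)) × List (Int × String)) (r : Int × String) :
    List (List (Int × String)) × List (Int × String) :=
  if r.1 = 1 ∧ st.2 ≠ [] then (st.1 ++ [st.2], [r]) else (st.1, st.2 ++ [r])

def split_into_maps (rounds : List (Int × String)) : List (List (Int × String)) :=
  let st := rounds.foldl pvStep ([], [])
  if st.2 ≠ [] then st.1 ++ [st.2] else st.1

-- ===== PORT B =====
-- inner while loop of Source B: advance j until j = n or rounds[j][0] == 1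
def pvFindJ (rounds : List (Int × String)) (n j : Nat) : Nat :=
  if h : j < n ∧ (rounds.getD j default).1 ≠ 1 then pvFindJ rounds n (j + 1) else j
termination_by n - j
decreasing_by omega

theorem pvFindJ_ge (rounds : List (Int × String)) (n j : Nat) : j ≤ pvFindJ rounds n j := by
  fun_induction pvFindJ with
  | case1 j _h ih => omega
  | case2 => exact Nat.le_refl _

-- outer while loop of Source B; rounds[i:j] with 0 ≤ i ≤ j is exactly (drop i).take (j - i)
def pvLoop (rounds : List (Int × String)) (n i : Nat)
    (maps : List (List (Int × String))) : List (List (Int × String)) :=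
  if h : i < n then
    let j := pvFindJ rounds n (i + 1)
    pvLoop rounds n j (maps ++ [(rounds.drop i).take (j - i)])
  else maps
termination_by n - i
decreasing_by have := pvFindJ_ge rounds n (i + 1); omega

def split_into_maps_alt (rounds : List (Int × String)) : List (List (Int × String)) :=
  pvLoop rounds rounds.length 0 []

-- ===== PRECONDITION & SPEC =====
def Spec_split_into_maps (rounds : List (Int × String)) (out : List (List (Int × String))) : Prop := out = split_into_maps_alt rounds
instance (rounds : List (Int × String)) (out : List (List (Int × String))) : Decidable (Spec_split_into_maps rounds out) := by unfold Spec_split_into_maps; infer_instance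

-- ===== CLAIM (what is proved, stated in full; the proofs are below) =====
def Claim_equal_split_into_maps : Prop := ∀ (rounds : List (Int × String)), Dom_split_into_maps rounds → Spec_split_into_maps rounds (split_into_maps rounds)

-- ===== LEMMAS AND PROOFS =====

-- common reference shape: groups are head :: leading non-boundary elements, recursively
def pvSplit : List (Int × String) → List (List (Int × String))
  | [] => []
  | r :: rest =>
      (r :: rest.takeWhile (fun p => p.1 ≠ 1)) ::
        pvSplit (rest.dropWhile (fun p => p.1 ≠ 1))
termination_by l => l.length
decreasing_by simpa using Nat.lt_succ_of_le (List.length_dropWhile_le _ _)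

theorem take_takeWhile_length {α : Type} (p : α → Bool) (l : List α) :
    l.take (l.takeWhile p).length = l.takeWhile p := by
  induction l with
  | nil => rfl
  | cons x xs ih =>
    by_cases h : p x
    · simp [h, ih]
    · simp [h]

theorem drop_takeWhile_length {α : Type} (p : α → Bool) (l : List α) :
    l.drop (l.takeWhile p).length = l.dropWhile p := by
  induction l with
  | nil => rfl
  | cons x xs ih =>
    by_cases h : p x
    · simp [h, ih]
    · simp [h]

theorem pvFindJ_eq (rounds : List (Int × String)) (j : Nat) :
    pvFindJ rounds rounds.length j
      = j + ((rounds.drop j).takeWhile (fun p => p.1 ≠ 1)).length := by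
  fun_induction pvFindJ with
  | case1 j h ih =>
    have hj : j < rounds.length := h.1
    have hd : rounds.drop j = rounds[j] :: rounds.drop (j + 1) :=
      List.drop_eq_getElem_cons hj
    have h2 := h.2
    simp only [List.getD, List.getElem?_eq_getElem hj, Option.getD_some] at h2
    have hp : (decide (rounds[j].1 ≠ 1)) = true := by simpa using h2
    rw [hd, List.takeWhile_cons, hp, if_pos rfl]
    simp only [List.length_cons]
    omega
  | case2 j h =>
    rcases Nat.lt_or_ge j rounds.length with hj | hj
    · have hd : rounds.drop j = rounds[j] :: rounds.drop (j + 1) :=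
        List.drop_eq_getElem_cons hj
      have hget : rounds.getD j default = rounds[j] := by
        simp only [List.getD, List.getElem?_eq_getElem hj, Option.getD_some]
      have hp : rounds[j].1 = 1 := by
        by_contra hc
        exact h ⟨hj, by rw [hget]; exact hc⟩
      rw [hd, List.takeWhile_cons]
      simp [hp]
    · simp [List.drop_eq_nil_of_le hj]

theorem pvLoop_eq (rounds : List (Int × String)) (i : Nat)
    (maps : List (List (Int × String))) :
    pvLoop rounds rounds.length i maps = maps ++ pvSplit (rounds.drop i) := by
  fun_induction pvLoop with
  | case1 i maps h j ih =>
    have hd : rounds.drop i = rounds[i] :: rounds.drop (i + 1) :=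
      List.drop_eq_getElem_cons h
    have hj : j = (i + 1) + ((rounds.drop (i + 1)).takeWhile (fun p => p.1 ≠ 1)).length :=
      pvFindJ_eq rounds (i + 1)
    have hgrp : (rounds.drop i).take (j - i)
        = rounds[i] :: (rounds.drop (i + 1)).takeWhile (fun p => p.1 ≠ 1) := by
      rw [hd, hj]
      have : (i + 1) + ((rounds.drop (i + 1)).takeWhile (fun p => p.1 ≠ 1)).length - i
          = ((rounds.drop (i + 1)).takeWhile (fun p => p.1 ≠ 1)).length + 1 := by omega
      rw [this, List.take_succ_cons, take_takeWhile_length]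
    have hrest : rounds.drop j = (rounds.drop (i + 1)).dropWhile (fun p => p.1 ≠ 1) := by
      rw [← drop_takeWhile_length, List.drop_drop, hj]
    rw [ih, hgrp, hrest, hd, pvSplit]
    simp
  | case2 i maps h =>
    have : rounds.drop i = [] := List.drop_eq_nil_of_le (by omega)
    simp [this, pvSplit]

theorem alt_eq_pvSplit (rounds : List (Int × String)) :
    split_into_maps_alt rounds = pvSplit rounds := by
  simpa using pvLoop_eq rounds 0 []

theorem foldl_pvStep_glue (xs : List (Int × String)) :
    ∀ (maps : List (List (Int × String))) (cur : List (Int × String)), cur ≠ [] →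
      (let st := xs.foldl pvStep (maps, cur);
       if st.2 ≠ [] then st.1 ++ [st.2] else st.1)
      = maps ++ ((cur ++ xs.takeWhile (fun p => p.1 ≠ 1)) ::
          pvSplit (xs.dropWhile (fun p => p.1 ≠ 1))) := by
  induction xs with
  | nil =>
    intro maps cur hcur
    simp [pvSplit, hcur]
  | cons x xs ih =>
    intro maps cur hcur
    by_cases hx : x.1 = 1
    · have hstep : pvStep (maps, cur) x = (maps ++ [cur], [x]) := by
        simp [pvStep, hx, hcur]
      simp only [List.foldl_cons, hstep]
      rw [ih (maps ++ [cur]) [x] (by simp)]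
      rw [List.takeWhile_cons, List.dropWhile_cons]
      simp [hx, pvSplit]
    · have hstep : pvStep (maps, cur) x = (maps, cur ++ [x]) := by
        simp [pvStep, hx]
      simp only [List.foldl_cons, hstep]
      rw [ih maps (cur ++ [x]) (by simp)]
      rw [List.takeWhile_cons, List.dropWhile_cons]
      simp [hx]

theorem a_eq_pvSplit (rounds : List (Int × String)) :
    split_into_maps rounds = pvSplit rounds := by
  cases rounds with
  | nil => simp [split_into_maps, pvSplit]
  | cons r rest =>
    have hstep : pvStep ([], []) r = ([], [r]) := by simp [pvStep]
    unfold split_into_maps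
    simp only [List.foldl_cons, hstep]
    rw [foldl_pvStep_glue rest [] [r] (by simp)]
    simp [pvSplit]

-- ===== VERDICT (by name: the statement is the Claim_ definition above) =====
theorem split_into_maps_spec : Claim_equal_split_into_maps := by
  intro rounds _
  unfold Spec_split_into_maps
  rw [a_eq_pvSplit, alt_eq_pvSplit]
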